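-- pv_equiv track=rewrite | github.com/skrylor/ComfyUI-CivitAI-Downloader | download.py | find_version_by_name
-- ===== SOURCE A (Python) =====
-- def find_version_by_name(versions, version_name):
--     """Find a version by its name"""
--     version_name = version_name.lower()
--
--     # First try exact match
--     for version in versions:
--         if version.get('name', '').lower() == version_name:
--             return version
--
--     # Then try starts with
--     for version in versions:
--         if version.get('name', '').lower().startswith(version_name):
--             return version
--
--     # Then try contains
--     for version in versions:
--         if version_name in version.get('name', '').lower():
--             return version
--
--     return None
-- ===== SOURCE B (Python) =====
-- def find_version_by_name(versions, version_name):
--     """Find a version by its name (single pass, three priority slots)."""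
--     version_name = version_name.lower()
--     exact = prefix = contains = None
--     for version in versions:
--         name = version.get('name', '').lower()
--         if exact is None and name == version_name:
--             exact = version
--         if prefix is None and name.startswith(version_name):
--             prefix = version
--         if contains is None and version_name in name:
--             contains = version
--     if exact is not None:
--         return exact
--     if prefix is not None:
--         return prefix
--     return contains
-- ===== Notes on version B (the rewrite author's own statement) =====
-- stated objective: alternative
-- what changed: Replaces A's three sequential scans with a single pass that lowercases each name once and fills exact/prefix/contains slots only while still empty, then returns by priority.
import Mathlib
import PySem

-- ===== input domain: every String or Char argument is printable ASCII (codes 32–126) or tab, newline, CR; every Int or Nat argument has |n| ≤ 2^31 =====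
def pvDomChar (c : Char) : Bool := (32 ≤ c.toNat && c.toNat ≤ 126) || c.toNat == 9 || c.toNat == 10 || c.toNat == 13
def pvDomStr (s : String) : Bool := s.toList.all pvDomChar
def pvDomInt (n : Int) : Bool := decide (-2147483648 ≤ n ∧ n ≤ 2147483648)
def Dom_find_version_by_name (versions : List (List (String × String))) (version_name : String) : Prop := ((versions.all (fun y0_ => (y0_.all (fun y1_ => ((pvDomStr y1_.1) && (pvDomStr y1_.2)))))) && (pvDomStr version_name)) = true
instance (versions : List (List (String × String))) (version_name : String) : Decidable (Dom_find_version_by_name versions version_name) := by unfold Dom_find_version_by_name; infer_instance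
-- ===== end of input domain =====

-- ===== PORT A =====
-- B changes: one pass filling three priority slots (exact/prefix/contains) instead of A's three sequential scans; same cost, different structure.

-- version.get('name', '').lower()
def pvNameLower (version : List (String × String)) : String :=
  PySem.Str.lower (PySem.Dict.getD (PySem.Dict.mk version) "name" "")

def find_version_by_name (versions : List (List (String × String))) (version_name : String) : Option (List (String × String)) :=
  let v := PySem.Str.lower version_name
  -- first try exact match
  match versions.find? (fun version => pvNameLower version == v) with
  | some version => some version
  | none =>
    -- then try starts with
    match versions.find? (fun version => PySem.Str.startswith (pvNameLower version) v) with
    | some version => some version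
    | none =>
      -- then try contains
      match versions.find? (fun version => PySem.Str.isIn v (pvNameLower version)) with
      | some version => some version
      | none => none

-- ===== PORT B =====
-- one step of B's loop: fill each still-empty slot whose condition holds
def pvStep (v : String) (st : Option (List (String × String)) × Option (List (String × String)) × Option (List (String × String)))
    (version : List (String × String)) :
    Option (List (String × String)) × Option (List (String × String)) × Option (List (String × String)) :=
  let name := pvNameLower version
  let exact := if st.1.isNone && (name == v) then some version else st.1
  let prefx := if st.2.1.isNone && PySem.Str.startswith name v then some version else st.2.1
  let contains := if st.2.2.isNone && PySem.Str.isIn v name then some version else st.2.2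
  (exact, prefx, contains)

def find_version_by_name_alt (versions : List (List (String × String))) (version_name : String) : Option (List (String × String)) :=
  let v := PySem.Str.lower version_name
  let st := versions.foldl (pvStep v) (none, none, none)
  match st.1 with
  | some version => some version
  | none =>
    match st.2.1 with
    | some version => some version
    | none => st.2.2

-- ===== PRECONDITION & SPEC =====
def Spec_find_version_by_name (versions : List (List (String × String))) (version_name : String) (out : Option (List (String × String))) : Prop := out = find_version_by_name_alt versions version_name
instance (versions : List (List (String × String))) (version_name : String) (out : Option (List (String × String))) : Decidable (Spec_find_version_by_name versions version_name out) := by unfold Spec_find_version_by_name; infer_instance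

-- ===== CLAIM (what is proved, stated in full; the proofs are below) =====
def Claim_equal_find_version_by_name : Prop := ∀ (versions : List (List (String × String))) (version_name : String), Dom_find_version_by_name versions version_name → Spec_find_version_by_name versions version_name (find_version_by_name versions version_name)

-- ===== LEMMAS AND PROOFS =====

-- B's fold leaves a filled slot alone and otherwise records the first match of its predicate
theorem pvFoldl_step (v : String) (l : List (List (String × String)))
    (e p c : Option (List (String × String))) :
    l.foldl (pvStep v) (e, p, c) =
      (e.or (l.find? (fun x => pvNameLower x == v)),
       p.or (l.find? (fun x => PySem.Str.startswith (pvNameLower x) v)),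
       c.or (l.find? (fun x => PySem.Str.isIn v (pvNameLower x)))) := by
  induction l generalizing e p c with
  | nil => simp
  | cons x xs ih =>
    simp only [List.foldl_cons, List.find?_cons]
    rw [ih]
    cases e <;> cases p <;> cases c <;>
      simp [pvStep] <;>
      split_ifs <;>
      simp_all <;>
      simp [beq_eq_false_iff_ne.mpr ‹pvNameLower x ≠ v›]

-- ===== VERDICT (by name: the statement is the Claim_ definition above) =====
theorem find_version_by_name_spec : Claim_equal_find_version_by_name := by
  intro versions version_name _
  show _ = _
  unfold find_version_by_name find_version_by_name_alt
  simp only [pvFoldl_step, Option.none_or]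
  rcases h1 : versions.find? (fun x => pvNameLower x == PySem.Str.lower version_name) with _ | r1 <;>
  rcases h2 : versions.find? (fun x => PySem.Str.startswith (pvNameLower x) (PySem.Str.lower version_name)) with _ | r2 <;>
  rcases h3 : versions.find? (fun x => PySem.Str.isIn (PySem.Str.lower version_name) (pvNameLower x)) with _ | r3 <;>
  rfl
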